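-- pv_equiv track=rewrite | github.com/cuongpiger/algorithms-training | solutions/36.py | bfs
-- ===== SOURCE A (Python) =====
-- from queue import Queue
--
-- def bfs(key, lock, other_keys):
--     q = Queue()
--     q.put(key)
--     visited = dict()
--     visited[key] = 0
--
--     while not q.empty():
--         key_comb = q.get()
--         key_comb_visited = visited.get(key_comb)
--
--         for ok in other_keys:
--             new_key_comb = (key_comb * ok) % 100000
--
--             if visited.get(new_key_comb) is None:
--                 visited[new_key_comb] = key_comb_visited + 1
--                 q.put(new_key_comb)
--
--                 if new_key_comb == lock:
--                     return visited.get(new_key_comb)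
--
--     return -1
-- ===== SOURCE B (Python) =====
-- def bfs(key, lock, other_keys):
--     # Whole-level set-image iteration: no queue, no per-node marking/early return.
--     # Each round replaces the current level by its image under all multipliers
--     # minus everything already seen, then tests lock membership once per level.
--     seen = {key}
--     cur = {key}
--     d = 0
--     while cur:
--         cur = {(x * ok) % 100000 for x in cur for ok in other_keys} - seen
--         d += 1
--         if lock in cur:
--             return d
--         seen |= cur
--     return -1
-- ===== Notes on version B (the rewrite author's own statement) =====
-- stated objective: alternative
-- what changed: Replaces the node-at-a-time Queue BFS with a per-node distance dict and mid-scan early return by whole-level set-image iteration: each round maps the entire current level through all multipliers as one set comprehension, subtracts the seen set, tests lock membership once per level, and counts levels with a single integer.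
import Mathlib
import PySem

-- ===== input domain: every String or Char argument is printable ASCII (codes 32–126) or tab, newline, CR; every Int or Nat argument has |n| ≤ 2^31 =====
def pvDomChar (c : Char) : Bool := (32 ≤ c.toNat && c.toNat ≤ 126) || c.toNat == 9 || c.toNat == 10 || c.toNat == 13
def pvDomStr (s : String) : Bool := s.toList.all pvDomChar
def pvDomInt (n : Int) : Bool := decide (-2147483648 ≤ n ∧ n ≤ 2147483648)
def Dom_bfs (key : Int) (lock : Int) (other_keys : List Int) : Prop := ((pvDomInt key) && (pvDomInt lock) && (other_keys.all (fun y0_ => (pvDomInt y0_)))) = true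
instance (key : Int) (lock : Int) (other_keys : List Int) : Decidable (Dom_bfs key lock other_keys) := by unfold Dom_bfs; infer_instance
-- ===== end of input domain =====

-- B replaces A's node-at-a-time Queue+distance-dict BFS by whole-level set-image
-- iteration (image of the current level minus everything seen, one lock-membership
-- test per level): an alternative decomposition, same asymptotic cost.


-- ===== PORT A =====
-- queue.Queue of ints, ported as the standard two-list FIFO queue
-- (put = O(1) enqueue at the back, get? = dequeue at the front; none = queue empty).
structure BfsQueue where
  front : List Int
  back : List Int          -- in reverse order
deriving Repr, DecidableEq

def BfsQueue.put (q : BfsQueue) (x : Int) : BfsQueue := ⟨q.front, x :: q.back⟩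

def BfsQueue.get? (q : BfsQueue) : Option (Int × BfsQueue) :=
  match q.front with
  | x :: f => some (x, ⟨f, q.back⟩)
  | [] =>
    match q.back.reverse with
    | [] => none
    | x :: f => some (x, ⟨f, []⟩)

-- inner 'for ok in other_keys' loop of A; .error r = the Python 'return r',
-- .ok (visited', newly-discovered) = the loop fell through (the new nodes are
-- enqueued by the caller, in this order).  visited is Python's dict, a hash map.
def bfsInnerA (lock kc d : Int) (vis : Std.HashMap Int Int) : List Int → Except Int (Std.HashMap Int Int × List Int)
  | [] => .ok (vis, [])
  | ok :: rest =>
    let nk := PySem.Int.mod (kc * ok) 100000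
    if vis[nk]?.isNone then
      let vis' := vis.insert nk (d + 1)
      if nk = lock then .error (vis'[nk]?.getD 0)
      else
        match bfsInnerA lock kc d vis' rest with
        | .error r => .error r
        | .ok (v, news) => .ok (v, nk :: news)
    else bfsInnerA lock kc d vis rest

-- the 'while not q.empty()' loop; fuel makes the loop total
-- (one unit per dequeued node; never exhausted in practice).
def bfsLoopA (lock : Int) (oks : List Int) : Nat → BfsQueue → Std.HashMap Int Int → Int
  | 0, _, _ => -1
  | Nat.succ f, q, vis =>
    match q.get? with
    | none => -1
    | some (kc, q') =>
      let d := vis[kc]?.getD 0           -- visited.get(key_comb); always present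
      match bfsInnerA lock kc d vis oks with
      | .error r => r
      | .ok (vis', news) => bfsLoopA lock oks f (news.foldl BfsQueue.put q') vis'

def bfs (key : Int) (lock : Int) (other_keys : List Int) : Int :=
  bfsLoopA lock other_keys 100002 (BfsQueue.put ⟨[], []⟩ key) ((∅ : Std.HashMap Int Int).insert key 0)

-- ===== PORT B =====
-- {(x * ok) % 100000 for x in cur for ok in other_keys}, a hash set
-- (built by iterating the set cur: the resulting SET does not depend on the order)
def bfsImage (cur : Std.HashSet Int) (oks : List Int) : Std.HashSet Int :=
  Std.HashSet.ofList (cur.toList.flatMap (fun x => oks.map (fun ok => PySem.Int.mod (x * ok) 100000)))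

-- the 'while cur:' loop of B; fuel = one unit per level (never exhausted in practice).
def bfsLoopB (lock : Int) (oks : List Int) : Nat → Std.HashSet Int → Std.HashSet Int → Int → Int
  | 0, _, _, _ => -1
  | Nat.succ f, cur, seen, d =>
    if cur.isEmpty then -1
    else
      let cur' := Std.HashSet.filter (fun x => !seen.contains x) (bfsImage cur oks)   -- {…} - seen
      let d' := d + 1
      if cur'.contains lock then d'
      else bfsLoopB lock oks f cur' (seen.insertMany cur'.toList) d'

def bfs_alt (key : Int) (lock : Int) (other_keys : List Int) : Int :=
  bfsLoopB lock other_keys 100002 (Std.HashSet.ofList [key]) (Std.HashSet.ofList [key]) 0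

-- ===== PRECONDITION & SPEC =====
def Spec_bfs (key : Int) (lock : Int) (other_keys : List Int) (out : Int) : Prop := out = bfs_alt key lock other_keys
instance (key : Int) (lock : Int) (other_keys : List Int) (out : Int) : Decidable (Spec_bfs key lock other_keys out) := by unfold Spec_bfs; infer_instance

-- ===== CLAIM (what is proved, stated in full; the proofs are below) =====
def Claim_equal_bfs : Prop := ∀ (key : Int) (lock : Int) (other_keys : List Int), Dom_bfs key lock other_keys → Spec_bfs key lock other_keys (bfs key lock other_keys)

-- ===== LEMMAS AND PROOFS =====

-- the logical content of a queue
def BfsQueue.toList (q : BfsQueue) : List Int := q.front ++ q.back.reverse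

theorem BfsQueue.toList_put (q : BfsQueue) (x : Int) : (q.put x).toList = q.toList ++ [x] := by
  simp [BfsQueue.put, BfsQueue.toList]

theorem BfsQueue.toList_foldl_put (news : List Int) (q : BfsQueue) :
    (news.foldl BfsQueue.put q).toList = q.toList ++ news := by
  induction news generalizing q with
  | nil => simp
  | cons n ns ih => rw [List.foldl_cons, ih, BfsQueue.toList_put, List.append_assoc]; rfl

theorem BfsQueue.get?_eq_none (q : BfsQueue) (h : q.toList = []) : q.get? = none := by
  obtain ⟨f, b⟩ := q
  simp only [BfsQueue.toList, List.append_eq_nil_iff, List.reverse_eq_nil_iff] at h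
  simp [BfsQueue.get?, h.1, h.2]

theorem BfsQueue.get?_eq_some (q : BfsQueue) (x : Int) (xs : List Int) (h : q.toList = x :: xs) :
    ∃ q' : BfsQueue, q.get? = some (x, q') ∧ q'.toList = xs := by
  obtain ⟨f, b⟩ := q
  cases f with
  | cons y f' =>
    simp only [BfsQueue.toList, List.cons_append, List.cons.injEq] at h
    exact ⟨⟨f', b⟩, by simp [BfsQueue.get?, h.1], by simpa [BfsQueue.toList] using h.2⟩
  | nil =>
    simp only [BfsQueue.toList, List.nil_append] at h
    exact ⟨⟨xs, []⟩, by simp [BfsQueue.get?, h], by simp [BfsQueue.toList]⟩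

-- membership in a hash map, phrased through lookup
theorem bfs_hm_mem_iff (m : Std.HashMap Int Int) (x : Int) : x ∈ m ↔ ¬(m[x]? = none) := by
  rw [Std.HashMap.mem_iff_contains, Std.HashMap.contains_eq_isSome_getElem?,
    Option.isSome_iff_ne_none]

theorem bfs_hm_get_insert (m : Std.HashMap Int Int) (k a v : Int) :
    (m.insert k v)[a]? = if a = k then some v else m[a]? := by
  rw [Std.HashMap.getElem?_insert]
  by_cases h : a = k
  · subst h; rw [if_pos (beq_self_eq_true a), if_pos rfl]
  · rw [if_neg (fun hb => h (beq_iff_eq.mp hb).symm), if_neg h]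

-- a list of distinct values drawn from {key} ∪ [0,100000) has at most 100001 entries
theorem bfs_len_bound (key : Int) (l : List Int) (hnd : l.Nodup)
    (h : ∀ x ∈ l, x = key ∨ (0 ≤ x ∧ x < 100000)) : l.length ≤ 100001 := by
  have hsub : l.toFinset ⊆ insert key (Finset.Ico (0 : Int) 100000) := by
    intro x hx
    rcases h x (List.mem_toFinset.mp hx) with h1 | h2
    · exact Finset.mem_insert.mpr (Or.inl h1)
    · exact Finset.mem_insert.mpr (Or.inr (Finset.mem_Ico.mpr h2))
  have hle := Finset.card_le_card hsub
  rw [List.toFinset_card_of_nodup hnd] at hle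
  have hcard := Finset.card_insert_le key (Finset.Ico (0 : Int) 100000)
  rw [Int.card_Ico] at hcard
  omega

-- a hash map whose keys all lie in {key} ∪ [0,100000) has at most 100001 entries
theorem bfs_hm_size_bound (key : Int) (m : Std.HashMap Int Int)
    (h : ∀ x, ¬(m[x]? = none) → x = key ∨ (0 ≤ x ∧ x < 100000)) : m.size ≤ 100001 := by
  have hnd : m.keys.Nodup := by
    have hd := Std.HashMap.distinct_keys (m := m)
    exact hd.imp (fun hab => by intro he; subst he; simp at hab)
  rw [← Std.HashMap.length_keys]
  refine bfs_len_bound key _ hnd (fun x hx => ?_)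
  exact h x ((bfs_hm_mem_iff m x).mp (Std.HashMap.mem_keys.mp hx))

theorem bfs_mod_bounds (a : Int) : 0 ≤ PySem.Int.mod a 100000 ∧ PySem.Int.mod a 100000 < 100000 :=
  ⟨PySem.Int.mod_nonneg a (by norm_num), PySem.Int.mod_lt a (by norm_num)⟩

-- characterization of A's inner for-loop: it returns early with d+1 exactly when lock
-- is among the fresh products of this node; otherwise it inserts exactly the fresh
-- products, in order, all with value d+1, growing the map by their number.
theorem bfsInnerA_char (lock kc dd : Int) :
    ∀ (oks : List Int) (vis : Std.HashMap Int Int),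
    ( ((∃ ok ∈ oks, PySem.Int.mod (kc * ok) 100000 = lock) ∧ vis[lock]? = none) →
        bfsInnerA lock kc dd vis oks = .error (dd + 1) )
    ∧ ( ¬((∃ ok ∈ oks, PySem.Int.mod (kc * ok) 100000 = lock) ∧ vis[lock]? = none) →
        ∃ (vis' : Std.HashMap Int Int) (news : List Int),
          bfsInnerA lock kc dd vis oks = .ok (vis', news) ∧
          (∀ x, x ∈ news ↔ (∃ ok ∈ oks, PySem.Int.mod (kc * ok) 100000 = x) ∧ vis[x]? = none) ∧
          (∀ x, vis'[x]? = if x ∈ news then some (dd + 1) else vis[x]?) ∧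
          vis'.size = vis.size + news.length ) := by
  intro oks
  induction oks with
  | nil =>
    intro vis
    constructor
    · rintro ⟨⟨ok, hok, _⟩, _⟩; exact absurd hok (List.not_mem_nil)
    · intro _
      exact ⟨vis, [], rfl, by simp, by simp, by simp⟩
  | cons ok rest ih =>
    intro vis
    by_cases hfresh : vis[(PySem.Int.mod (kc * ok) 100000)]? = none
    · -- fresh product: insert it
      have hsz : (vis.insert (PySem.Int.mod (kc * ok) 100000) (dd + 1)).size = vis.size + 1 := by
        rw [Std.HashMap.size_insert,
          if_neg (fun hmem => ((bfs_hm_mem_iff vis _).mp hmem) hfresh)]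
      by_cases hlk : PySem.Int.mod (kc * ok) 100000 = lock
      · -- immediate return
        have hrun : bfsInnerA lock kc dd vis (ok :: rest) = .error (dd + 1) := by
          have hfresh' : vis[lock]? = none := hlk ▸ hfresh
          have hself : (vis.insert lock (dd + 1))[lock]? = some (dd + 1) := by
            rw [bfs_hm_get_insert, if_pos rfl]
          simp only [bfsInnerA, hlk, hfresh', Option.isNone_none, if_true, hself,
            Option.getD_some]
        constructor
        · intro _; exact hrun
        · intro hC
          exact absurd ⟨⟨ok, List.mem_cons_self .., hlk⟩, hlk ▸ hfresh⟩ hC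
      · -- insert and continue on rest
        have hlkget : (vis.insert (PySem.Int.mod (kc * ok) 100000) (dd + 1))[lock]? = vis[lock]? := by
          rw [bfs_hm_get_insert, if_neg (fun h => hlk h.symm)]
        have hstep : bfsInnerA lock kc dd vis (ok :: rest)
            = (match bfsInnerA lock kc dd (vis.insert (PySem.Int.mod (kc * ok) 100000) (dd + 1)) rest with
               | .error r => .error r
               | .ok (v, news) => .ok (v, PySem.Int.mod (kc * ok) 100000 :: news)) := by
          simp only [bfsInnerA, hfresh, Option.isNone_none, if_true, hlk, if_false]
        obtain ⟨ih1, ih2⟩ := ih (vis.insert (PySem.Int.mod (kc * ok) 100000) (dd + 1))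
        constructor
        · rintro ⟨⟨ok', hok', hlok'⟩, hlnone⟩
          rcases List.mem_cons.mp hok' with rfl | hok'
          · exact absurd hlok' hlk
          · rw [hstep, ih1 ⟨⟨ok', hok', hlok'⟩, hlkget.trans hlnone⟩]
        · intro hC
          have hC' : ¬((∃ o ∈ rest, PySem.Int.mod (kc * o) 100000 = lock)
              ∧ (vis.insert (PySem.Int.mod (kc * ok) 100000) (dd + 1))[lock]? = none) := by
            rintro ⟨⟨o, ho, hlo⟩, hln⟩
            exact hC ⟨⟨o, List.mem_cons_of_mem _ ho, hlo⟩, hlkget ▸ hln⟩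
          obtain ⟨vis', news, heq, hmem, hget, hsz'⟩ := ih2 hC'
          have hselfget : (vis.insert (PySem.Int.mod (kc * ok) 100000) (dd + 1))[(PySem.Int.mod (kc * ok) 100000)]? = some (dd + 1) := by
            rw [bfs_hm_get_insert, if_pos rfl]
          refine ⟨vis', PySem.Int.mod (kc * ok) 100000 :: news, by rw [hstep, heq], ?_, ?_, ?_⟩
          · intro x
            constructor
            · intro hx
              rcases List.mem_cons.mp hx with rfl | hx
              · exact ⟨⟨ok, List.mem_cons_self .., rfl⟩, hfresh⟩
              · obtain ⟨⟨o, ho, hxo⟩, hxn⟩ := (hmem x).mp hx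
                rw [bfs_hm_get_insert] at hxn
                by_cases hxx : x = PySem.Int.mod (kc * ok) 100000
                · rw [if_pos hxx] at hxn; exact absurd hxn (Option.some_ne_none _)
                · rw [if_neg hxx] at hxn; exact ⟨⟨o, List.mem_cons_of_mem _ ho, hxo⟩, hxn⟩
            · rintro ⟨⟨o, ho, hxo⟩, hxn⟩
              by_cases hxx : x = PySem.Int.mod (kc * ok) 100000
              · exact hxx ▸ List.mem_cons_self ..
              · rcases List.mem_cons.mp ho with rfl | ho
                · exact absurd hxo.symm hxx
                · refine List.mem_cons_of_mem _ ((hmem x).mpr ⟨⟨o, ho, hxo⟩, ?_⟩)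
                  rw [bfs_hm_get_insert, if_neg hxx]
                  exact hxn
          · intro x
            rw [hget x, bfs_hm_get_insert]
            by_cases hxnews : x ∈ news
            · simp [hxnews]
            · by_cases hxx : x = PySem.Int.mod (kc * ok) 100000
              · simp [hxx]
              · simp [hxnews]
          · rw [hsz', hsz]
            simp [Nat.add_assoc, Nat.add_comm]
    · -- already visited: skip
      have hstep : bfsInnerA lock kc dd vis (ok :: rest) = bfsInnerA lock kc dd vis rest := by
        obtain ⟨v, hv⟩ := Option.ne_none_iff_exists'.mp hfresh
        simp only [bfsInnerA, hv, Option.isNone_some, Bool.false_eq_true, if_false]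
      obtain ⟨ih1, ih2⟩ := ih vis
      constructor
      · rintro ⟨⟨ok', hok', hlok'⟩, hlnone⟩
        rcases List.mem_cons.mp hok' with rfl | hok'
        · exact absurd (hlok' ▸ hfresh) (fun h => h hlnone)
        · rw [hstep, ih1 ⟨⟨ok', hok', hlok'⟩, hlnone⟩]
      · intro hC
        have hC' : ¬((∃ o ∈ rest, PySem.Int.mod (kc * o) 100000 = lock) ∧ vis[lock]? = none) := by
          rintro ⟨⟨o, ho, hlo⟩, hln⟩
          exact hC ⟨⟨o, List.mem_cons_of_mem _ ho, hlo⟩, hln⟩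
        obtain ⟨vis', news, heq, hmem, hget, hsz'⟩ := ih2 hC'
        refine ⟨vis', news, by rw [hstep, heq], ?_, hget, hsz'⟩
        intro x
        rw [hmem x]
        constructor
        · rintro ⟨⟨o, ho, hxo⟩, hxn⟩
          exact ⟨⟨o, List.mem_cons_of_mem _ ho, hxo⟩, hxn⟩
        · rintro ⟨⟨o, ho, hxo⟩, hxn⟩
          rcases List.mem_cons.mp ho with rfl | ho
          · exact absurd (hxo ▸ hfresh) (fun h => h hxn)
          · exact ⟨⟨o, ho, hxo⟩, hxn⟩

-- processing one whole BFS level of A (the list L of still-queued level-d nodes,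
-- P = already-discovered level-(d+1) nodes behind them): either A returns d+1,
-- exactly when lock is a fresh product of the level, or it reaches the next level
-- having discovered exactly the fresh products of the level.
set_option maxHeartbeats 800000 in
theorem bfsLevelA (lock : Int) (oks : List Int) (d : Int) (f : Nat) :
    ∀ (L P : List Int) (q : BfsQueue) (vis : Std.HashMap Int Int),
    q.toList = L ++ P →
    (∀ x ∈ L, vis[x]? = some d) →
    ( ((∃ y ∈ L, ∃ ok ∈ oks, PySem.Int.mod (y * ok) 100000 = lock) ∧ vis[lock]? = none) →
        bfsLoopA lock oks (L.length + f) q vis = d + 1 )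
    ∧ ( ¬((∃ y ∈ L, ∃ ok ∈ oks, PySem.Int.mod (y * ok) 100000 = lock) ∧ vis[lock]? = none) →
        ∃ (q' : BfsQueue) (vis' : Std.HashMap Int Int) (N : List Int),
          bfsLoopA lock oks (L.length + f) q vis = bfsLoopA lock oks f q' vis' ∧
          q'.toList = P ++ N ∧
          (∀ x, x ∈ N ↔ (∃ y ∈ L, ∃ ok ∈ oks, PySem.Int.mod (y * ok) 100000 = x) ∧ vis[x]? = none) ∧
          (∀ x, vis'[x]? = if x ∈ N then some (d + 1) else vis[x]?) ∧
          vis'.size = vis.size + N.length ) := by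
  intro L
  induction L with
  | nil =>
    intro P q vis hq _
    constructor
    · rintro ⟨⟨y, hy, _⟩, _⟩; exact absurd hy (List.not_mem_nil)
    · intro _
      exact ⟨q, vis, [], by simp, by simpa using hq, by simp, by simp, by simp⟩
  | cons k L' ihL =>
    intro P q vis hq hvals
    obtain ⟨q₁, hget, hq₁⟩ := BfsQueue.get?_eq_some q k (L' ++ P) (by simpa using hq)
    have hk : vis[k]? = some d := hvals k (List.mem_cons_self ..)
    have hlen : (k :: L').length + f = Nat.succ (L'.length + f) := by simp; omega
    obtain ⟨in1, in2⟩ := bfsInnerA_char lock k d oks vis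
    by_cases hC₁ : (∃ ok ∈ oks, PySem.Int.mod (k * ok) 100000 = lock) ∧ vis[lock]? = none
    · -- this node discovers lock
      have hrun : bfsLoopA lock oks ((k :: L').length + f) q vis = d + 1 := by
        rw [hlen]
        simp only [bfsLoopA, hget, hk, Option.getD_some, in1 hC₁]
      constructor
      · intro _; exact hrun
      · intro hC
        obtain ⟨⟨ok, hok, hlok⟩, hln⟩ := hC₁
        exact absurd ⟨⟨k, List.mem_cons_self .., ok, hok, hlok⟩, hln⟩ hC
    · obtain ⟨vis₁, news, hin, hmem₁, hget₁, hsz₁⟩ := in2 hC₁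
      have hlockpres : vis₁[lock]? = vis[lock]? := by
        rw [hget₁ lock]
        by_cases hl : lock ∈ news
        · exact absurd ((hmem₁ lock).mp hl) hC₁
        · simp [hl]
      have hstep : bfsLoopA lock oks ((k :: L').length + f) q vis
          = bfsLoopA lock oks (L'.length + f) (news.foldl BfsQueue.put q₁) vis₁ := by
        rw [hlen]
        simp only [bfsLoopA, hget, hk, Option.getD_some, hin]
      have hq₂ : (news.foldl BfsQueue.put q₁).toList = L' ++ ((P ++ news)) := by
        rw [BfsQueue.toList_foldl_put, hq₁]
        simp [List.append_assoc]
      have hvals' : ∀ x ∈ L', vis₁[x]? = some d := by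
        intro x hx
        rw [hget₁ x]
        by_cases hxn : x ∈ news
        · have := ((hmem₁ x).mp hxn).2
          rw [hvals x (List.mem_cons_of_mem _ hx)] at this
          exact absurd this (Option.some_ne_none _)
        · simp only [hxn, if_false]
          exact hvals x (List.mem_cons_of_mem _ hx)
      obtain ⟨ih1, ih2⟩ := ihL (P ++ news) (news.foldl BfsQueue.put q₁) vis₁ hq₂ hvals'
      constructor
      · rintro ⟨⟨y, hy, ok, hok, hlok⟩, hln⟩
        rcases List.mem_cons.mp hy with rfl | hy
        · exact absurd ⟨⟨ok, hok, hlok⟩, hln⟩ hC₁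
        · rw [hstep, ih1 ⟨⟨y, hy, ok, hok, hlok⟩, hlockpres.trans hln⟩]
      · intro hC
        have hC' : ¬((∃ y ∈ L', ∃ ok ∈ oks, PySem.Int.mod (y * ok) 100000 = lock) ∧ vis₁[lock]? = none) := by
          rintro ⟨⟨y, hy, ok, hok, hlok⟩, hln⟩
          exact hC ⟨⟨y, List.mem_cons_of_mem _ hy, ok, hok, hlok⟩, hlockpres ▸ hln⟩
        obtain ⟨q', vis', N', heq, hq', hmemN', hgetN', hszN'⟩ := ih2 hC'
        refine ⟨q', vis', news ++ N', by rw [hstep, heq], by rw [hq', List.append_assoc], ?_, ?_, ?_⟩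
        · intro x
          rw [List.mem_append, hmem₁ x, hmemN' x]
          constructor
          · rintro (⟨⟨ok, hok, hxo⟩, hxn⟩ | ⟨⟨y, hy, ok, hok, hxo⟩, hxn⟩)
            · exact ⟨⟨k, List.mem_cons_self .., ok, hok, hxo⟩, hxn⟩
            · rw [hget₁ x] at hxn
              by_cases hxnews : x ∈ news
              · rw [if_pos hxnews] at hxn; exact absurd hxn (Option.some_ne_none _)
              · rw [if_neg hxnews] at hxn; exact ⟨⟨y, List.mem_cons_of_mem _ hy, ok, hok, hxo⟩, hxn⟩
          · rintro ⟨⟨y, hy, ok, hok, hxo⟩, hxn⟩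
            by_cases hxnews : (∃ ok ∈ oks, PySem.Int.mod (k * ok) 100000 = x) ∧ vis[x]? = none
            · exact Or.inl hxnews
            · rcases List.mem_cons.mp hy with rfl | hy
              · exact absurd ⟨⟨ok, hok, hxo⟩, hxn⟩ hxnews
              · refine Or.inr ⟨⟨y, hy, ok, hok, hxo⟩, ?_⟩
                rw [hget₁ x]
                have hxm : x ∉ news := fun h => hxnews ((hmem₁ x).mp h)
                simp only [hxm, if_false]
                exact hxn
        · intro x
          rw [hgetN' x, hget₁ x]
          by_cases h1 : x ∈ N'
          · simp [h1]
          · by_cases h2 : x ∈ news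
            · simp [h1, h2]
            · simp [h1, h2]
        -- size
        · rw [hszN', hsz₁, List.length_append]
          omega

theorem bfs_fuel_step (fa f lenL lenN sz : Nat)
    (h1 : lenL + (100001 - sz) ≤ fa)
    (h2 : fa ≤ f + 1)
    (hb : sz + lenN ≤ 100001) (hpos : 0 < lenL) :
    lenN + (100001 - (sz + lenN)) ≤ fa - lenL ∧ fa - lenL ≤ f := by omega

theorem bfsLoopB_empty (lock : Int) (oks : List Int) (f : Nat) (cur seen : Std.HashSet Int)
    (d : Int) (h : cur.isEmpty = true) : bfsLoopB lock oks f cur seen d = -1 := by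
  cases f <;> simp [bfsLoopB, h]

theorem bfs_mem_image (cur : Std.HashSet Int) (oks : List Int) (x : Int) :
    x ∈ bfsImage cur oks ↔ ∃ y ∈ cur, ∃ ok ∈ oks, PySem.Int.mod (y * ok) 100000 = x := by
  rw [bfsImage, Std.HashSet.mem_ofList]
  constructor
  · intro h
    obtain ⟨y, hy, hxin⟩ := List.mem_flatMap.mp (List.contains_iff_mem.mp h)
    obtain ⟨ok, hok, hxo⟩ := List.mem_map.mp hxin
    exact ⟨y, Std.HashSet.mem_toList.mp hy, ok, hok, hxo⟩
  · rintro ⟨y, hy, ok, hok, hxo⟩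
    exact List.contains_iff_mem.mpr
      (List.mem_flatMap.mpr ⟨y, Std.HashSet.mem_toList.mpr hy, List.mem_map.mpr ⟨ok, hok, hxo⟩⟩)

theorem bfs_mem_filter_not_contains (m seen : Std.HashSet Int) (x : Int) :
    x ∈ Std.HashSet.filter (fun y => !seen.contains y) m ↔ x ∈ m ∧ x ∉ seen := by
  rw [Std.HashSet.mem_filter]
  constructor
  · rintro ⟨h, hf⟩
    rw [Std.HashSet.get_eq] at hf
    refine ⟨h, fun hs => ?_⟩
    rw [Bool.not_eq_eq_eq_not, Bool.not_true] at hf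
    exact absurd (Std.HashSet.mem_iff_contains.mp hs) (by simp [hf])
  · rintro ⟨h, hs⟩
    refine ⟨h, ?_⟩
    rw [Std.HashSet.get_eq]
    have hc : seen.contains x = false := by
      cases hc' : seen.contains x
      · rfl
      · exact absurd (Std.HashSet.mem_iff_contains.mpr hc') hs
    rw [hc]
    rfl

-- main bisimulation, at level starts: A's queue holds exactly B's current level
-- (as a list), A's dict keys are B's seen set, the level nodes carry value d;
-- B's level fuel dominates A's node fuel, and A's node fuel is adequate.
theorem bfsLoop_corr (key lock : Int) (oks : List Int) :
    ∀ (fb fa : Nat) (cur seen : Std.HashSet Int) (L : List Int) (q : BfsQueue)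
      (vis : Std.HashMap Int Int) (d : Int),
    q.toList = L →
    (∀ x, x ∈ L ↔ x ∈ cur) →
    (∀ x ∈ L, vis[x]? = some d) →
    (∀ x, ¬(vis[x]? = none) ↔ x ∈ seen) →
    (∀ x, ¬(vis[x]? = none) → x = key ∨ (0 ≤ x ∧ x < 100000)) →
    L.length + (100001 - vis.size) ≤ fa →
    fa ≤ fb →
    bfsLoopA lock oks fa q vis = bfsLoopB lock oks fb cur seen d := by
  intro fb
  induction fb with
  | zero =>
    intro fa cur seen L q vis d _ _ _ _ _ _ hfb
    have : fa = 0 := by omega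
    rw [this]
    rfl
  | succ f ihf =>
    intro fa cur seen L q vis d hq hLcur hvals hseen hdom hfa hfb
    by_cases hcur : cur.isEmpty = true
    · -- empty frontier: both fall out with -1
      have hLnil : L = [] := by
        refine List.eq_nil_iff_forall_not_mem.mpr (fun x hx => ?_)
        exact (Std.HashSet.isEmpty_iff_forall_not_mem.mp hcur x) ((hLcur x).mp hx)
      have hB : bfsLoopB lock oks (Nat.succ f) cur seen d = -1 := by
        simp [bfsLoopB, hcur]
      rw [hB]
      cases fa with
      | zero => rfl
      | succ fa' =>
        have := BfsQueue.get?_eq_none q (by rw [hq, hLnil])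
        simp [bfsLoopA, this]
    · -- process one level
      have hLne : L ≠ [] := by
        intro hL
        refine hcur (Std.HashSet.isEmpty_iff_forall_not_mem.mpr (fun a ha => ?_))
        rw [hL] at hLcur
        exact absurd ((hLcur a).mpr ha) (List.not_mem_nil)
      have hLpos : 0 < L.length := List.length_pos_of_ne_nil hLne
      have hseen' : ∀ x, vis[x]? = none ↔ x ∉ seen := by
        intro x
        rw [← hseen x]
        tauto
      -- B's next level
      have hcur'mem : ∀ x, x ∈ Std.HashSet.filter (fun y => !seen.contains y) (bfsImage cur oks) ↔
          ((∃ y ∈ L, ∃ ok ∈ oks, PySem.Int.mod (y * ok) 100000 = x) ∧ vis[x]? = none) := by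
        intro x
        rw [bfs_mem_filter_not_contains, bfs_mem_image, hseen' x]
        constructor
        · rintro ⟨⟨y, hy, hrest⟩, hxs⟩; exact ⟨⟨y, (hLcur y).mpr hy, hrest⟩, hxs⟩
        · rintro ⟨⟨y, hy, hrest⟩, hxs⟩; exact ⟨⟨y, (hLcur y).mp hy, hrest⟩, hxs⟩
      have hfaL : L.length + (fa - L.length) = fa := by omega
      obtain ⟨lv1, lv2⟩ := bfsLevelA lock oks d (fa - L.length) L [] q vis (by simpa using hq) hvals
      have hBstep : bfsLoopB lock oks (Nat.succ f) cur seen d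
          = (if (Std.HashSet.filter (fun y => !seen.contains y) (bfsImage cur oks)).contains lock then d + 1
             else bfsLoopB lock oks f (Std.HashSet.filter (fun y => !seen.contains y) (bfsImage cur oks))
                    (seen.insertMany (Std.HashSet.filter (fun y => !seen.contains y) (bfsImage cur oks)).toList) (d + 1)) := by
        simp only [bfsLoopB, hcur, Bool.false_eq_true, if_false]
      by_cases hlock : lock ∈ Std.HashSet.filter (fun y => !seen.contains y) (bfsImage cur oks)
      · rw [hBstep, if_pos (Std.HashSet.mem_iff_contains.mp hlock), ← hfaL]
        exact lv1 ((hcur'mem lock).mp hlock)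
      · rw [hBstep, if_neg (fun hc => hlock (Std.HashSet.mem_iff_contains.mpr hc))]
        have hC : ¬((∃ y ∈ L, ∃ ok ∈ oks, PySem.Int.mod (y * ok) 100000 = lock) ∧ vis[lock]? = none) :=
          fun h => hlock ((hcur'mem lock).mpr h)
        obtain ⟨q', vis', N, heq, hq', hmemN, hgetN, hszN⟩ := lv2 hC
        rw [← hfaL, heq]
        have hNcur' : ∀ x, x ∈ N ↔ x ∈ Std.HashSet.filter (fun y => !seen.contains y) (bfsImage cur oks) := by
          intro x; rw [hmemN x, hcur'mem x]
        by_cases hcur' : (Std.HashSet.filter (fun y => !seen.contains y) (bfsImage cur oks)).isEmpty = true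
        · have hNnil : N = [] := by
            refine List.eq_nil_iff_forall_not_mem.mpr (fun x hx => ?_)
            exact (Std.HashSet.isEmpty_iff_forall_not_mem.mp hcur' x) ((hNcur' x).mp hx)
          rw [bfsLoopB_empty lock oks f _ _ _ hcur']
          have hq'nil : q'.toList = [] := by rw [hq', hNnil]; rfl
          cases (fa - L.length) with
          | zero => rfl
          | succ f' =>
            have := BfsQueue.get?_eq_none q' hq'nil
            simp [bfsLoopA, this]
        · -- recurse into the next level
          have hdom' : ∀ x, ¬(vis'[x]? = none) → x = key ∨ (0 ≤ x ∧ x < 100000) := by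
            intro x hx
            rw [hgetN x] at hx
            by_cases hxN : x ∈ N
            · obtain ⟨⟨y, _, ok, _, hxo⟩, _⟩ := (hmemN x).mp hxN
              exact Or.inr (hxo ▸ bfs_mod_bounds (y * ok))
            · rw [if_neg hxN] at hx
              exact hdom x hx
          have hbound : vis'.size ≤ 100001 := bfs_hm_size_bound key vis' hdom'
          obtain ⟨hfa', hfb'⟩ := bfs_fuel_step fa f L.length N.length vis.size
            hfa hfb (by omega) hLpos
          refine ihf (fa - L.length) (Std.HashSet.filter (fun y => !seen.contains y) (bfsImage cur oks))
            (seen.insertMany (Std.HashSet.filter (fun y => !seen.contains y) (bfsImage cur oks)).toList)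
            N q' vis' (d + 1)
            (by simpa using hq') hNcur'
            (fun x hx => by rw [hgetN x, if_pos hx])
            ?_ hdom' (by rw [hszN]; exact hfa') hfb'
          intro x
          rw [hgetN x, Std.HashSet.mem_insertMany_list]
          have htl : (Std.HashSet.filter (fun y => !seen.contains y) (bfsImage cur oks)).toList.contains x = true
              ↔ x ∈ Std.HashSet.filter (fun y => !seen.contains y) (bfsImage cur oks) := by
            rw [List.contains_iff_mem, Std.HashSet.mem_toList]
          by_cases hxN : x ∈ N
          · simp only [hxN, if_pos]
            constructor
            · intro _; exact Or.inr (htl.mpr ((hNcur' x).mp hxN))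
            · intro _; exact Option.some_ne_none _
          · simp only [hxN, if_false]
            rw [hseen x]
            constructor
            · exact Or.inl
            · rintro (hx | hx)
              · exact hx
              · exact absurd ((hNcur' x).mpr (htl.mp hx)) hxN

-- ===== VERDICT (by name: the statement is the Claim_ definition above) =====
theorem bfs_spec : Claim_equal_bfs := by
  intro key lock other_keys _
  unfold Spec_bfs bfs bfs_alt
  have hget0 : ∀ x, ((∅ : Std.HashMap Int Int).insert key 0)[x]?
      = if x = key then some 0 else none := by
    intro x
    rw [bfs_hm_get_insert]
    by_cases h : x = key
    · rw [if_pos h, if_pos h]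
    · rw [if_neg h, if_neg h, Std.HashMap.getElem?_empty]
  have hmemkey : ∀ x, x ∈ Std.HashSet.ofList [key] ↔ x = key := by
    intro x
    rw [Std.HashSet.mem_ofList, List.contains_iff_mem]
    simp
  have hsz0 : ((∅ : Std.HashMap Int Int).insert key 0).size = 1 := by
    rw [Std.HashMap.size_insert, if_neg (by simp)]
    simp
  refine bfsLoop_corr key lock other_keys 100002 100002 (Std.HashSet.ofList [key])
    (Std.HashSet.ofList [key]) [key] (BfsQueue.put ⟨[], []⟩ key)
    ((∅ : Std.HashMap Int Int).insert key 0) 0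
    (by simp [BfsQueue.put, BfsQueue.toList])
    (by intro x; rw [hmemkey x]; simp) ?_ ?_ ?_ (by rw [hsz0]; norm_num) (by omega)
  · intro x hx
    rw [hget0 x, if_pos (by simpa using hx)]
  · intro x
    rw [hget0 x, hmemkey x]
    constructor
    · intro h
      by_contra hx
      exact h (by rw [if_neg hx])
    · intro hx
      rw [if_pos hx]
      exact Option.some_ne_none _
  · intro x hx
    rw [hget0 x] at hx
    by_cases h : x = key
    · exact Or.inl h
    · rw [if_neg h] at hx
      exact absurd rfl hx
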